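-- pv_equiv track=rewrite | github.com/jajuTT/rtl-test-runs | ird/registers_utils.py | get_dependency_map_from_address_map
-- ===== SOURCE A (Python) =====
-- def resides_within_range(ele, start, end):
--     return ele >= start and ele <= end
--
-- def get_dependency_map_from_address_map(address_map):
--     dep_map = {}
--     for idx0, ele0 in enumerate(address_map):
--         dep_map[idx0] = []
--         for idx1, ele1 in enumerate(address_map):
--             if idx0 == idx1:
--                 continue
--             if resides_within_range(ele0['START'], ele1['START'], ele1['END']) and resides_within_range(ele0['END'], ele1['START'], ele1['END']):
--                 dep_map[idx0].append(idx1)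
--
--     for idx, deps in dep_map.items():
--         if len(deps) > 1:
--             sorted_deps = sorted(deps, key=lambda x: address_map[x]['END'] - address_map[x]['START'], reverse = True)
--             dep_map[idx] = sorted_deps
--
--     return dep_map
-- ===== SOURCE B (Python) =====
-- def get_dependency_map_from_address_map(address_map):
--     n = len(address_map)
--     if n < 2:
--         # no other interval exists that could contain anything
--         return {i: [] for i in range(n)}
--     # one global order: size-descending, ties by original index ascending
--     order = sorted(range(n), key=lambda i: (address_map[i]['START'] - address_map[i]['END'], i))
--     return {i: [j for j in order
--                 if j != i
--                 and address_map[j]['START'] <= address_map[i]['START']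
--                 and address_map[i]['START'] <= address_map[j]['END']
--                 and address_map[j]['START'] <= address_map[i]['END']
--                 and address_map[i]['END'] <= address_map[j]['END']]
--             for i in range(n)}
-- ===== Notes on version B (the rewrite author's own statement) =====
-- stated objective: alternative
-- what changed: Instead of A's per-key stable reverse sort of each dependency list after a dict-building pass, B computes one global index order (size-descending, ties by original index via a tuple key) up front and emits every dependency list as a filter of that precomputed order, so no per-list sorting remains.
import Mathlib
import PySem

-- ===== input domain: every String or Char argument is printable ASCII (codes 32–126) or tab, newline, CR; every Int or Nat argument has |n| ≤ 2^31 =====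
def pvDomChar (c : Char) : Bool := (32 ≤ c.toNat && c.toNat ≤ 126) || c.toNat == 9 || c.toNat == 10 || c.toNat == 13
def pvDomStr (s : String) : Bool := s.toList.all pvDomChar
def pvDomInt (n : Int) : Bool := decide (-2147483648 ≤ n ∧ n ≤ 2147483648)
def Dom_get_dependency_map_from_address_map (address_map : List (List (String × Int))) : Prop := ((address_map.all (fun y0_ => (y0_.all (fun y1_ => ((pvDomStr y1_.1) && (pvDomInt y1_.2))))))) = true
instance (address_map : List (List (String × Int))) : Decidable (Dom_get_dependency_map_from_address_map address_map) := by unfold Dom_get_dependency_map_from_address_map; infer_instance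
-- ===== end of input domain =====

-- B computes one global size-descending order up front (tuple key, ties by index) and emits each
-- dependency list as a filter of that order, instead of A's per-key reverse sort after the fact;
-- objective: alternative decomposition of the same O(n^2) task.


-- ===== PORT A =====
-- ele['KEY'] on the association-list dict: first match; the 0 default is only reached outside Pre_ (Python: KeyError)
def pvLookup (ele : List (String × Int)) (k : String) : Int :=
  ((PySem.Dict.mk ele).get? k).getD 0

def resides_within_range (ele start_ end_ : Int) : Bool :=
  decide (ele ≥ start_) && decide (ele ≤ end_)

-- key of A's per-list sort: address_map[x]['END'] - address_map[x]['START']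
def pvSizeKey (address_map : List (List (String × Int))) (x : Int) : Int :=
  pvLookup (PySem.List.pyGetD address_map x []) "END" - pvLookup (PySem.List.pyGetD address_map x []) "START"

def get_dependency_map_from_address_map (address_map : List (List (String × Int))) : List (Int × List Int) :=
  let dep_map : PySem.Dict Int (List Int) :=
    (PySem.List.enumerate address_map).foldl (fun d p =>
      let d1 := d.insert p.1 []
      (PySem.List.enumerate address_map).foldl (fun d q =>
        if q.1 == p.1 then d
        else if resides_within_range (pvLookup p.2 "START") (pvLookup q.2 "START") (pvLookup q.2 "END") &&
                resides_within_range (pvLookup p.2 "END") (pvLookup q.2 "START") (pvLookup q.2 "END") then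
          d.modify p.1 [] (· ++ [q.1])
        else d) d1) PySem.Dict.empty
  let dep_map2 := dep_map.items.foldl (fun d p =>
      if 1 < p.2.length then d.insert p.1 (PySem.List.sorted p.2 (pvSizeKey address_map) true) else d)
    dep_map
  dep_map2.items

-- ===== PORT B =====
def get_dependency_map_from_address_map_alt (address_map : List (List (String × Int))) : List (Int × List Int) :=
  let n : Int := PySem.List.len address_map
  if n < 2 then (PySem.List.pyRange 0 n).map (fun i => (i, ([] : List Int))) else
  let order := PySem.List.sorted2 (PySem.List.pyRange 0 n)
    (fun i => pvLookup (PySem.List.pyGetD address_map i []) "START" - pvLookup (PySem.List.pyGetD address_map i []) "END")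
    (fun i => i) false
  (PySem.List.pyRange 0 n).map (fun i =>
    (i, order.filter (fun j =>
      !(j == i) &&
      decide (pvLookup (PySem.List.pyGetD address_map j []) "START" ≤ pvLookup (PySem.List.pyGetD address_map i []) "START") &&
      decide (pvLookup (PySem.List.pyGetD address_map i []) "START" ≤ pvLookup (PySem.List.pyGetD address_map j []) "END") &&
      decide (pvLookup (PySem.List.pyGetD address_map j []) "START" ≤ pvLookup (PySem.List.pyGetD address_map i []) "END") &&
      decide (pvLookup (PySem.List.pyGetD address_map i []) "END" ≤ pvLookup (PySem.List.pyGetD address_map j []) "END"))))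

-- ===== PRECONDITION & SPEC =====
-- Pre_ excludes exactly the inputs where Python A raises KeyError: two or more elements and some
-- element lacking a "START" or "END" key (with at most one element A performs no key lookup at all).
def Pre_get_dependency_map_from_address_map (address_map : List (List (String × Int))) : Prop :=
  address_map.length ≤ 1 ∨
    ∀ ele ∈ address_map, "START" ∈ ele.map Prod.fst ∧ "END" ∈ ele.map Prod.fst
instance (address_map : List (List (String × Int))) : Decidable (Pre_get_dependency_map_from_address_map address_map) := by unfold Pre_get_dependency_map_from_address_map; infer_instance

def pvWitness_get_dependency_map_from_address_map : (List (List (String × Int))) :=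
  [[("START", 0), ("END", 10)], [("START", 2), ("END", 3)], [("START", 2), ("END", 3)]]

def Spec_get_dependency_map_from_address_map (address_map : List (List (String × Int))) (out : List (Int × List Int)) : Prop := out = get_dependency_map_from_address_map_alt address_map
instance (address_map : List (List (String × Int))) (out : List (Int × List Int)) : Decidable (Spec_get_dependency_map_from_address_map address_map out) := by unfold Spec_get_dependency_map_from_address_map; infer_instance

-- ===== CLAIM (what is proved, stated in full; the proofs are below) =====
def Claim_equal_get_dependency_map_from_address_map : Prop := ∀ (address_map : List (List (String × Int))), Dom_get_dependency_map_from_address_map address_map → Pre_get_dependency_map_from_address_map address_map → Spec_get_dependency_map_from_address_map address_map (get_dependency_map_from_address_map address_map)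

-- ===== LEMMAS AND PROOFS =====

-- the inner append-loop collapses to one insert at the fixed key
theorem pv_inner_collapse {β : Type} (g : β → Int) (p q : β → Bool) (k : Int)
    (l : List β) (d : PySem.Dict Int (List Int)) (v : List Int) :
    l.foldl (fun d x => if p x then d else if q x then d.modify k [] (· ++ [g x]) else d) (d.insert k v)
      = d.insert k (v ++ (l.filter (fun x => !p x && q x)).map g) := by
  induction l generalizing v with
  | nil => simp
  | cons x t ih =>
    by_cases hp : p x = true
    · simp [hp, List.foldl_cons, ih]
    · by_cases hq : q x = true
      · have h1 : (if p x = true then d.insert k v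
            else if q x = true then (d.insert k v).modify k [] (· ++ [g x]) else d.insert k v)
            = d.insert k (v ++ [g x]) := by
          simp [hp, hq, PySem.Dict.modify, PySem.Dict.getD_insert_self, PySem.Dict.insert_insert_self]
        rw [List.foldl_cons, h1, ih (v ++ [g x])]
        simp [hp, hq, List.filter_cons]
      · simp [hp, hq, List.foldl_cons, ih, List.filter_cons]

-- proof-local abbreviations
def pvS (am : List (List (String × Int))) (i : Int) : Int := pvLookup (PySem.List.pyGetD am i []) "START"
def pvE (am : List (List (String × Int))) (i : Int) : Int := pvLookup (PySem.List.pyGetD am i []) "END"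
def pvPred (am : List (List (String × Int))) (i j : Int) : Bool :=
  !(j == i) && (resides_within_range (pvS am i) (pvS am j) (pvE am j) &&
                resides_within_range (pvE am i) (pvS am j) (pvE am j))
-- the strict total order "bigger interval first, ties by smaller index first"
def pvRel (am : List (List (String × Int))) (a b : Int) : Prop :=
  pvSizeKey am b < pvSizeKey am a ∨ (pvSizeKey am a = pvSizeKey am b ∧ a < b)

theorem pv_insertBy_pairwise {R : Int → Int → Prop} {before : Int → Int → Bool} {x : Int} :
    ∀ {ys : List Int}, ys.Pairwise R →
    (∀ y ∈ ys, (before x y = true → R x y) ∧ (before x y = false → R y x)) →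
    (∀ y ∈ ys, ∀ z ∈ ys, R y z → before x y = true → before x z = true) →
    (PySem.List.insertBy before x ys).Pairwise R := by
  intro ys
  induction ys with
  | nil => intro _ _ _; simp [PySem.List.insertBy]
  | cons y t ih =>
    intro hys h1 h2
    rw [show PySem.List.insertBy before x (y :: t)
        = if before x y then x :: y :: t else y :: PySem.List.insertBy before x t by
      simp [PySem.List.insertBy]]
    rcases List.pairwise_cons.mp hys with ⟨hyt, hpt⟩
    by_cases hb : before x y = true
    · simp only [hb, if_true]
      refine List.pairwise_cons.mpr ⟨?_, hys⟩
      intro z hz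
      rcases List.mem_cons.mp hz with rfl | hz
      · exact (h1 z (by simp)).1 hb
      · exact (h1 z (by simp [hz])).1
          (h2 y (by simp) z (by simp [hz]) (hyt z hz) hb)
    · simp only [hb, if_false]
      refine List.pairwise_cons.mpr ⟨?_, ?_⟩
      · intro z hz
        rcases (PySem.List.insertBy_mem_iff before x z t).mp hz with rfl | hz
        · exact (h1 y (by simp)).2 (by simpa using hb)
        · exact hyt z hz
      · exact ih hpt (fun y hy => h1 y (by simp [hy]))
          (fun a ha b hb' => h2 a (by simp [ha]) b (by simp [hb']))

theorem pv_foldl_insertBy_pairwise {R : Int → Int → Prop} {before : Int → Int → Bool}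
    (hR1 : ∀ x y : Int, before x y = true → R x y)
    (hR2 : ∀ x y : Int, before x y = false → y < x → R y x)
    (hdc : ∀ x y z : Int, before x y = true → R y z → before x z = true) :
    ∀ (l acc : List Int), acc.Pairwise R → (∀ y ∈ acc, ∀ x ∈ l, y < x) → l.Pairwise (· < ·) →
    (l.foldl (fun a x => PySem.List.insertBy before x a) acc).Pairwise R := by
  intro l
  induction l with
  | nil => intro acc hacc _ _; simpa using hacc
  | cons x t ih =>
    intro acc hacc hlt hl
    rcases List.pairwise_cons.mp hl with ⟨hxt, hpt⟩
    rw [List.foldl_cons]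
    refine ih _ ?_ ?_ hpt
    · refine pv_insertBy_pairwise hacc ?_ ?_
      · intro y hy
        constructor
        · exact hR1 x y
        · intro hb; exact hR2 x y hb (hlt y hy x (by simp))
      · intro y _ z _ hyz hb; exact hdc x y z hb hyz
    · intro y hy x' hx'
      rcases (PySem.List.insertBy_mem_iff before x y acc).mp hy with rfl | hy
      · exact hxt x' hx'
      · exact hlt y hy x' (by simp [hx'])

theorem pv_phase2 (F : List Int → List Int) :
    ∀ (ks : List Int) (R : Int → List Int) (d : PySem.Dict Int (List Int)),
    ks.Nodup → (∀ j ∈ ks, d.contains j = true) → (∀ j ∈ ks, d.getD j [] = R j) →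
    ((ks.map (fun j => (j, R j))).foldl
        (fun d p => if 1 < p.2.length then d.insert p.1 (F p.2) else d) d).keys = d.keys
    ∧ (∀ j ∈ ks, ((ks.map (fun j => (j, R j))).foldl
        (fun d p => if 1 < p.2.length then d.insert p.1 (F p.2) else d) d).getD j []
        = if 1 < (R j).length then F (R j) else R j)
    ∧ (∀ j, j ∉ ks → ((ks.map (fun j => (j, R j))).foldl
        (fun d p => if 1 < p.2.length then d.insert p.1 (F p.2) else d) d).getD j []
        = d.getD j []) := by
  intro ks
  induction ks with
  | nil => intro R d _ _ _; exact ⟨rfl, by simp, by simp⟩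
  | cons k t ih =>
    intro R d hnd hc hv
    rcases List.nodup_cons.mp hnd with ⟨hkt, hndt⟩
    have hck : d.contains k = true := hc k (by simp)
    set d' : PySem.Dict Int (List Int) :=
      if 1 < (R k).length then d.insert k (F (R k)) else d with hd'
    have hc' : ∀ j ∈ t, d'.contains j = true := by
      intro j hj
      rw [hd']; split
      · rw [PySem.Dict.contains_insert]; simp [hc j (by simp [hj])]
      · exact hc j (by simp [hj])
    have hv' : ∀ j ∈ t, d'.getD j [] = R j := by
      intro j hj
      have hne : j ≠ k := fun h => hkt (h ▸ hj)
      rw [hd']; split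
      · rw [PySem.Dict.getD_insert_of_ne _ _ _ hne]; exact hv j (by simp [hj])
      · exact hv j (by simp [hj])
    have hkeys' : d'.keys = d.keys := by
      rw [hd']; split
      · exact PySem.Dict.keys_insert_of_contains d _ hck
      · rfl
    have step : (((k, R k) :: t.map (fun j => (j, R j))).foldl
        (fun d p => if 1 < p.2.length then d.insert p.1 (F p.2) else d) d)
        = (t.map (fun j => (j, R j))).foldl
            (fun d p => if 1 < p.2.length then d.insert p.1 (F p.2) else d) d' := by
      rw [List.foldl_cons]
    rcases ih R d' hndt hc' hv' with ⟨ihk, ihv, ihout⟩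
    refine ⟨?_, ?_, ?_⟩
    · rw [List.map_cons, step, ihk, hkeys']
    · intro j hj
      rcases List.mem_cons.mp hj with hj | hj
      · subst hj
        rw [List.map_cons, step, ihout j hkt, hd']
        split
        · rw [PySem.Dict.getD_insert_self]
        · exact hv j (by simp)
      · rw [List.map_cons, step]; exact ihv j hj
    · intro j hj
      have hjk : j ≠ k := by intro h; exact hj (by simp [h])
      have hjt : j ∉ t := fun h => hj (by simp [h])
      rw [List.map_cons, step, ihout j hjt, hd']
      split
      · exact PySem.Dict.getD_insert_of_ne _ _ _ hjk
      · rfl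


-- canonical index list, sort keys, dependency lists
def pvKs (am : List (List (String × Int))) : List Int := PySem.List.pyRange 0 (PySem.List.len am)
def pvK1 (am : List (List (String × Int))) (i : Int) : Int := pvS am i - pvE am i
def pvDeps (am : List (List (String × Int))) (i : Int) : List Int := (pvKs am).filter (pvPred am i)
def pvOrder (am : List (List (String × Int))) : List Int :=
  PySem.List.sorted2 (pvKs am) (pvK1 am) (fun i => i) false

theorem pv_ks_pairwise (am : List (List (String × Int))) : (pvKs am).Pairwise (· < ·) := by
  unfold pvKs
  rw [PySem.List.pyRange_zero]
  exact (List.pairwise_lt_range).map _ (by intro a b h; exact_mod_cast h)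

theorem pv_ks_nodup (am : List (List (String × Int))) : (pvKs am).Nodup :=
  (pv_ks_pairwise am).imp (fun h => by omega) |>.nodup

theorem pv_rel_antisymm (am : List (List (String × Int))) (a b : Int) :
    pvRel am a b → pvRel am b a → a = b := by
  unfold pvRel; intro h1 h2; rcases h1 with h1 | ⟨h1, h1'⟩ <;> rcases h2 with h2 | ⟨h2, h2'⟩ <;> omega

-- mirror of A's two folds as named definitions (rfl-equal to the port)
def pvDictA (am : List (List (String × Int))) : PySem.Dict Int (List Int) :=
  (PySem.List.enumerate am).foldl (fun d p =>
    (PySem.List.enumerate am).foldl (fun d q =>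
      if q.1 == p.1 then d
      else if resides_within_range (pvLookup p.2 "START") (pvLookup q.2 "START") (pvLookup q.2 "END") &&
              resides_within_range (pvLookup p.2 "END") (pvLookup q.2 "START") (pvLookup q.2 "END") then
        d.modify p.1 [] (· ++ [q.1])
      else d) (d.insert p.1 [])) PySem.Dict.empty

def pvDictA2 (am : List (List (String × Int))) : PySem.Dict Int (List Int) :=
  (pvDictA am).items.foldl (fun d p =>
    if 1 < p.2.length then d.insert p.1 (PySem.List.sorted p.2 (pvSizeKey am) true) else d)
    (pvDictA am)

theorem pv_order_pairwise (am : List (List (String × Int))) : (pvOrder am).Pairwise (pvRel am) := by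
  have hrfl : pvOrder am = (pvKs am).foldl (fun acc x => PySem.List.insertBy
      (fun a b => decide (pvK1 am a < pvK1 am b) ||
        (!decide (pvK1 am b < pvK1 am a) && decide (a < b))) x acc) [] := rfl
  rw [hrfl]
  refine pv_foldl_insertBy_pairwise ?_ ?_ ?_ (pvKs am) [] (by simp) (by simp) (pv_ks_pairwise am)
  · intro x y h
    simp only [Bool.or_eq_true, Bool.and_eq_true, Bool.not_eq_true', decide_eq_true_eq,
      decide_eq_false_iff_not] at h
    unfold pvRel pvSizeKey pvK1 pvS pvE at *
    omega
  · intro x y h hyx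
    simp only [Bool.or_eq_false_iff, Bool.and_eq_false_iff, Bool.not_eq_false',
      decide_eq_true_eq, decide_eq_false_iff_not] at h
    unfold pvRel pvSizeKey pvK1 pvS pvE at *
    omega
  · intro x y z h hyz
    simp only [Bool.or_eq_true, Bool.and_eq_true, Bool.not_eq_true', decide_eq_true_eq,
      decide_eq_false_iff_not] at h ⊢
    unfold pvRel pvSizeKey pvK1 pvS pvE at *
    omega

theorem pv_sortedA_pairwise (am : List (List (String × Int))) (i : Int) :
    (PySem.List.sorted (pvDeps am i) (pvSizeKey am) true).Pairwise (pvRel am) := by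
  rw [PySem.List.sorted_rev_eq_foldl_insertBy]
  refine pv_foldl_insertBy_pairwise ?_ ?_ ?_ (pvDeps am i) [] (by simp) (by simp)
    ((pv_ks_pairwise am).filter _)
  · intro x y h
    simp only [decide_eq_true_eq] at h
    exact Or.inl h
  · intro x y h hyx
    simp only [decide_eq_false_iff_not] at h
    unfold pvRel at *
    omega
  · intro x y z h hyz
    simp only [decide_eq_true_eq] at h ⊢
    unfold pvRel at hyz
    omega

-- the per-index payload: A's per-list reverse sort equals B's filter of the global order
theorem pv_point (am : List (List (String × Int))) (i : Int) :
    (if 1 < (pvDeps am i).length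
      then PySem.List.sorted (pvDeps am i) (pvSizeKey am) true else pvDeps am i)
    = (pvOrder am).filter (pvPred am i) := by
  have hperm : ((pvOrder am).filter (pvPred am i)).Perm (pvDeps am i) :=
    (PySem.List.sorted2_perm (pvKs am) (pvK1 am) (fun i => i) false).filter _
  by_cases hlen : 1 < (pvDeps am i).length
  · simp only [hlen, if_true]
    have hfilter_pw := (pv_order_pairwise am).filter (pvPred am i)
    have hA_pw := pv_sortedA_pairwise am i
    have hA_perm : (PySem.List.sorted (pvDeps am i) (pvSizeKey am) true).Perm (pvDeps am i) :=
      PySem.List.sorted_perm _ _ _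
    exact List.Perm.eq_of_pairwise
      (fun a b _ _ h1 h2 => pv_rel_antisymm am a b h1 h2)
      hA_pw hfilter_pw (hA_perm.trans hperm.symm)
  · simp only [hlen, if_false]
    rcases hD : pvDeps am i with _ | ⟨a, _ | ⟨b, t⟩⟩
    · rw [hD] at hperm
      exact (List.Perm.eq_nil hperm).symm
    · rw [hD] at hperm
      exact (List.perm_singleton.mp hperm).symm
    · rw [hD] at hlen
      simp at hlen

theorem pv_dictA_items (am : List (List (String × Int))) :
    (pvDictA am).items = (pvKs am).map (fun j => (j, pvDeps am j)) := by
  unfold pvDictA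
  have hstep : ∀ (d : PySem.Dict Int (List Int)) (p : Int × List (String × Int)),
      (PySem.List.enumerate am).foldl (fun d q =>
        if q.1 == p.1 then d
        else if resides_within_range (pvLookup p.2 "START") (pvLookup q.2 "START") (pvLookup q.2 "END") &&
                resides_within_range (pvLookup p.2 "END") (pvLookup q.2 "START") (pvLookup q.2 "END") then
          d.modify p.1 [] (· ++ [q.1])
        else d) (d.insert p.1 [])
      = d.insert p.1 (((PySem.List.enumerate am).filter (fun q => !(q.1 == p.1) &&
          (resides_within_range (pvLookup p.2 "START") (pvLookup q.2 "START") (pvLookup q.2 "END") &&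
           resides_within_range (pvLookup p.2 "END") (pvLookup q.2 "START") (pvLookup q.2 "END")))).map (fun q => q.1)) := by
    intro d p
    have h := pv_inner_collapse (fun q : Int × List (String × Int) => q.1)
      (fun q => q.1 == p.1)
      (fun q => resides_within_range (pvLookup p.2 "START") (pvLookup q.2 "START") (pvLookup q.2 "END") &&
                resides_within_range (pvLookup p.2 "END") (pvLookup q.2 "START") (pvLookup q.2 "END"))
      p.1 (PySem.List.enumerate am) d []
    simpa using h
  rw [PySem.List.foldl_congr_mem (PySem.List.enumerate am)
    (fun (d : PySem.Dict Int (List Int)) (p : Int × List (String × Int)) =>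
      (PySem.List.enumerate am).foldl (fun d q =>
        if q.1 == p.1 then d
        else if resides_within_range (pvLookup p.2 "START") (pvLookup q.2 "START") (pvLookup q.2 "END") &&
                resides_within_range (pvLookup p.2 "END") (pvLookup q.2 "START") (pvLookup q.2 "END") then
          d.modify p.1 [] (· ++ [q.1])
        else d) (d.insert p.1 []))
    (fun (d : PySem.Dict Int (List Int)) (p : Int × List (String × Int)) =>
      d.insert p.1 (((PySem.List.enumerate am).filter (fun q => !(q.1 == p.1) &&
        (resides_within_range (pvLookup p.2 "START") (pvLookup q.2 "START") (pvLookup q.2 "END") &&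
         resides_within_range (pvLookup p.2 "END") (pvLookup q.2 "START") (pvLookup q.2 "END")))).map (fun q => q.1)))
    PySem.Dict.empty
    (fun d p _ => hstep d p)]
  have hnodup : ((PySem.List.enumerate am).map Prod.fst).Nodup := by
    rw [PySem.List.enumerate_eq_map_pyRange am [], List.map_map,
      show (Prod.fst ∘ fun (j : Int) => (j, PySem.List.pyGetD am j [])) = (fun (j : Int) => j) from rfl,
      List.map_id_fun', id_eq]
    exact pv_ks_nodup am
  rw [PySem.Dict.items_foldl_insert_fresh (PySem.List.enumerate am) Prod.fst _ _
    (fun a _ => by simp) hnodup]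
  rw [show (PySem.Dict.empty : PySem.Dict Int (List Int)).items = [] from rfl, List.nil_append]
  rw [PySem.List.enumerate_eq_map_pyRange am [], List.map_map]
  apply List.map_congr_left
  intro j hj
  simp only [Function.comp_apply]
  refine Prod.ext rfl ?_
  show (((PySem.List.pyRange 0 (PySem.List.len am)).map
      (fun j => (j, PySem.List.pyGetD am j []))).filter _).map (fun q => q.1) = pvDeps am j
  rw [List.filter_map, List.map_map]
  unfold pvDeps pvKs
  rw [show ((fun (q : Int × List (String × Int)) => q.1) ∘ (fun j => (j, PySem.List.pyGetD am j [])))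
      = (fun (j : Int) => j) from rfl, List.map_id_fun']
  rfl

theorem pv_dictA_keys (am : List (List (String × Int))) : (pvDictA am).keys = pvKs am := by
  simp only [PySem.Dict.keys, pv_dictA_items, List.map_map]
  rw [show ((fun (x : Int × List Int) => x.1) ∘ fun (j : Int) => (j, pvDeps am j)) = (fun (j : Int) => j) from rfl,
    List.map_id_fun', id_eq]

theorem pv_dictA2_items (am : List (List (String × Int))) :
    (pvDictA2 am).items = (pvKs am).map (fun i => (i, if 1 < (pvDeps am i).length
      then PySem.List.sorted (pvDeps am i) (pvSizeKey am) true else pvDeps am i)) := by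
  have hnd := pv_ks_nodup am
  have hkeys := pv_dictA_keys am
  have hnodupkeys : (pvDictA am).keys.Nodup := by rw [hkeys]; exact hnd
  have hc : ∀ j ∈ pvKs am, (pvDictA am).contains j = true := by
    intro j hj
    rw [PySem.Dict.contains_eq_decide_mem_keys, hkeys]
    simpa using hj
  have hv : ∀ j ∈ pvKs am, (pvDictA am).getD j [] = pvDeps am j := by
    intro j hj
    exact PySem.Dict.getD_of_mem_items _
      (by rw [pv_dictA_items]; exact List.mem_map_of_mem hj) hnodupkeys []
  rcases pv_phase2 (fun v => PySem.List.sorted v (pvSizeKey am) true) (pvKs am) (pvDeps am)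
      (pvDictA am) hnd hc hv with ⟨hk2, hv2, -⟩
  unfold pvDictA2
  rw [pv_dictA_items am]
  have hndk2 : (((pvKs am).map (fun j => (j, pvDeps am j))).foldl
      (fun d p => if 1 < p.2.length then d.insert p.1 (PySem.List.sorted p.2 (pvSizeKey am) true) else d)
      (pvDictA am)).keys.Nodup := by rw [hk2, hkeys]; exact hnd
  rw [PySem.Dict.items_eq_map_keys _ hndk2 [], hk2, hkeys]
  apply List.map_congr_left
  intro j hj
  rw [hv2 j hj]

theorem pv_A_canon (am : List (List (String × Int))) :
    get_dependency_map_from_address_map am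
    = (pvKs am).map (fun i => (i, if 1 < (pvDeps am i).length
        then PySem.List.sorted (pvDeps am i) (pvSizeKey am) true else pvDeps am i)) := by
  have h : get_dependency_map_from_address_map am = (pvDictA2 am).items := rfl
  rw [h, pv_dictA2_items]

theorem pv_pred_eq (am : List (List (String × Int))) (i j : Int) :
    (!(j == i) && decide (pvS am j ≤ pvS am i) && decide (pvS am i ≤ pvE am j) &&
      decide (pvS am j ≤ pvE am i) && decide (pvE am i ≤ pvE am j)) = pvPred am i j := by
  simp only [pvPred, resides_within_range, ge_iff_le, Bool.and_assoc]

-- with fewer than two intervals every dependency list is empty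
theorem pv_small (am : List (List (String × Int))) (hn : PySem.List.len am < 2)
    (i : Int) (hi : i ∈ pvKs am) : (pvOrder am).filter (pvPred am i) = [] := by
  refine List.filter_eq_nil_iff.mpr ?_
  intro j hj
  have hjks : j ∈ pvKs am :=
    ((PySem.List.sorted2_perm (pvKs am) (pvK1 am) (fun i => i) false).mem_iff).mp hj
  have hji : j = i := by
    rcases PySem.List.mem_pyRange_one.mp hjks with ⟨h1, h2⟩
    rcases PySem.List.mem_pyRange_one.mp hi with ⟨h3, h4⟩
    unfold PySem.List.len at *
    omega
  subst hji
  simp [pvPred]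

theorem pv_B_canon (am : List (List (String × Int))) :
    get_dependency_map_from_address_map_alt am
    = (pvKs am).map (fun i => (i, (pvOrder am).filter (pvPred am i))) := by
  have h : get_dependency_map_from_address_map_alt am
      = (if PySem.List.len am < 2 then (pvKs am).map (fun i => (i, ([] : List Int))) else
          (pvKs am).map (fun i => (i, (pvOrder am).filter (fun j =>
          !(j == i) && decide (pvS am j ≤ pvS am i) && decide (pvS am i ≤ pvE am j) &&
          decide (pvS am j ≤ pvE am i) && decide (pvE am i ≤ pvE am j))))) := rfl
  rw [h]
  by_cases hn : PySem.List.len am < 2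
  · rw [if_pos hn]
    apply List.map_congr_left
    intro i hi
    exact Prod.ext rfl (pv_small am hn i hi).symm
  · rw [if_neg hn]
    apply List.map_congr_left
    intro i _
    refine Prod.ext rfl ?_
    exact List.filter_congr (fun j _ => pv_pred_eq am i j)

theorem pv_main (address_map : List (List (String × Int))) :
    get_dependency_map_from_address_map address_map = get_dependency_map_from_address_map_alt address_map := by
  rw [pv_A_canon, pv_B_canon]
  exact List.map_congr_left (fun i _ => Prod.ext rfl (pv_point address_map i))

-- ===== VERDICT (by name: the statement is the Claim_ definition above) =====
theorem get_dependency_map_from_address_map_spec : Claim_equal_get_dependency_map_from_address_map := by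
  intro am _ _
  unfold Spec_get_dependency_map_from_address_map
  exact pv_main am
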